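-- pv_equiv track=rewrite | github.com/ooeunz/programmers | heap/scovile.py | solution
-- ===== SOURCE A (Python) =====
-- import heapq
--
-- def solution(scoville, K):
--     heapq.heapify(scoville)
--     cnt = 0
--
--     while scoville[0] < K:
--         if len(scoville) == 1:
--             return -1
--
--         fir = heapq.heappop(scoville)
--         sec = heapq.heappop(scoville)
--         mix = fir + sec * 2
--
--         heapq.heappush(scoville, mix)
--         cnt += 1
--     return cnt
-- ===== SOURCE B (Python) =====
-- def solution(scoville, K):
--     # Sorted-list re-implementation (no heapq): keep the working list sorted
--     # ascending; the two smallest are always at the front, and the new mix is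
--     # put back by a linear insertion scan.  Return value only: does not mutate
--     # the argument (A heapifies/pops scoville in place).
--     s = sorted(scoville)
--     cnt = 0
--     while s and s[0] < K:
--         if len(s) == 1:
--             return -1
--         mix = s[0] + s[1] * 2
--         rest = s[2:]
--         i = 0
--         while i < len(rest) and rest[i] <= mix:
--             i += 1
--         rest.insert(i, mix)
--         s = rest
--         cnt += 1
--     return cnt
-- ===== Notes on version B (the rewrite author's own statement) =====
-- stated objective: alternative
-- what changed: Replaces the binary min-heap (heapq heapify/heappop/heappush) by a plain ascending sorted list: the two smallest elements are taken from the front and the mix is re-inserted by a linear insertion scan.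
import Mathlib
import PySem

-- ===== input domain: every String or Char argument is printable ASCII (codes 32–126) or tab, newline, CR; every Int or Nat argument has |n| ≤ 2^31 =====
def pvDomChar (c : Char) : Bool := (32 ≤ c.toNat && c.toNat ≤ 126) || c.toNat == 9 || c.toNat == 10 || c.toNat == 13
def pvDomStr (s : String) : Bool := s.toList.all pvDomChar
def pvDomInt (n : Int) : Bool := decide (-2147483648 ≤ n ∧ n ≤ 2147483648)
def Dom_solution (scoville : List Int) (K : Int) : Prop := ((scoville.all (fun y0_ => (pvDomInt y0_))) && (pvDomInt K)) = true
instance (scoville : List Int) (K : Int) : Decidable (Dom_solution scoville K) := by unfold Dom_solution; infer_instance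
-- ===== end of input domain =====

-- B replaces A's binary min-heap (heapq) by an ascending sorted list with linear re-insertion
-- of the mix; equivalence is about the RETURN value only (A mutates its argument in place, B does not).

-- ===== PORT A =====
-- A calls the heapq library; its functions (heapify, heappop, heappush and the internal
-- _siftdown/_siftup) are transliterated below step for step from CPython's Lib/heapq.py.
-- All list indices these functions use are nonnegative and in range, so `List.getD i 0`
-- is exact for Python's `heap[i]` there.

def hget (h : List Int) (i : Nat) : Int := h.getD i 0

-- CPython's _siftdown(heap, startpos, pos) with newitem = heap[pos] passed explicitly
def siftdownAux (h : List Int) (startpos pos : Nat) (newitem : Int) : List Int :=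
  if _hlt : startpos < pos then
    let parentpos := (pos - 1) / 2
    let parent := hget h parentpos
    if newitem < parent then
      siftdownAux (h.set pos parent) startpos parentpos newitem
    else h.set pos newitem
  else h.set pos newitem
termination_by pos
decreasing_by omega

-- CPython's _siftup(heap, pos) inner loop; endpos = len(heap), startpos = original pos
def siftupAux (h : List Int) (endpos startpos pos : Nat) (newitem : Int) : List Int :=
  if _hc : 2 * pos + 1 < endpos then
    let childpos := if 2 * pos + 2 < endpos ∧ ¬ hget h (2 * pos + 1) < hget h (2 * pos + 2)
      then 2 * pos + 2 else 2 * pos + 1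
    siftupAux (h.set pos (hget h childpos)) endpos startpos childpos newitem
  else
    -- heap[pos] = newitem; _siftdown(heap, startpos, pos)
    siftdownAux (h.set pos newitem) startpos pos newitem
termination_by endpos - pos
decreasing_by split <;> omega

def siftup (h : List Int) (pos : Nat) : List Int :=
  siftupAux h h.length pos pos (hget h pos)

def heappush (h : List Int) (item : Int) : List Int :=
  let h1 := h ++ [item]                       -- heap.append(item)
  siftdownAux h1 0 (h1.length - 1) item       -- _siftdown(heap, 0, len(heap)-1)

def heappop (h : List Int) : Int × List Int :=
  let lastelt := hget h (h.length - 1)        -- lastelt = heap.pop()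
  let rest := h.dropLast
  if rest.isEmpty then (lastelt, rest)
  else (hget rest 0, siftup (rest.set 0 lastelt) 0)

def heapify (h : List Int) : List Int :=
  ((List.range (h.length / 2)).reverse).foldl (fun acc i => siftup acc i) h

-- the while loop of A; fuel (length + 1 at the call) only makes the recursion total,
-- each real iteration shrinks the heap by one element
def solLoop (fuel : Nat) (h : List Int) (K : Int) (cnt : Int) : Int :=
  match fuel with
  | 0 => cnt
  | fuel + 1 =>
    if hget h 0 < K then
      if h.length = 1 then -1
      else
        let p1 := heappop h
        let p2 := heappop p1.2
        solLoop fuel (heappush p2.2 (p1.1 + p2.1 * 2)) K (cnt + 1)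
    else cnt

def solution (scoville : List Int) (K : Int) : Int :=
  solLoop (scoville.length + 1) (heapify scoville) K 0

-- ===== PORT B =====
-- rest.insert(i, mix) where i = number of leading elements ≤ mix (the scanning while loop)
def insertMix (rest : List Int) (mix : Int) : List Int :=
  PySem.List.insert rest (((rest.takeWhile (fun y => y ≤ mix)).length : Nat) : Int) mix

theorem length_insertMix (rest : List Int) (mix : Int) :
    (insertMix rest mix).length = rest.length + 1 := by
  simp [insertMix, PySem.List.length_insert]

def altLoop (s : List Int) (K : Int) (cnt : Int) : Int :=
  match s with
  | [] => cnt
  | [x] => if x < K then -1 else cnt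
  | x :: y :: rest =>
    if x < K then altLoop (insertMix rest (x + y * 2)) K (cnt + 1) else cnt
termination_by s.length
decreasing_by simp [length_insertMix]

def solution_alt (scoville : List Int) (K : Int) : Int :=
  altLoop (PySem.List.sorted scoville (fun x => x) false) K 0

-- ===== PRECONDITION & SPEC =====
-- A raises IndexError on the empty list (scoville[0]); that is the only input excluded.
def Pre_solution (scoville : List Int) (K : Int) : Prop := scoville ≠ []
instance (scoville : List Int) (K : Int) : Decidable (Pre_solution scoville K) := by
  unfold Pre_solution; infer_instance

def pvWitness_solution : List Int × Int := ([1, 2, 3, 9, 10, 12], 7)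

def Spec_solution (scoville : List Int) (K : Int) (out : Int) : Prop := out = solution_alt scoville K
instance (scoville : List Int) (K : Int) (out : Int) : Decidable (Spec_solution scoville K out) := by
  unfold Spec_solution; infer_instance

-- ===== CLAIM (what is proved, stated in full; the proofs are below) =====
def Claim_equal_solution : Prop := ∀ (scoville : List Int) (K : Int), Dom_solution scoville K → Pre_solution scoville K → Spec_solution scoville K (solution scoville K)

-- ===== LEMMAS AND PROOFS =====

-- getD/set pointwise lemmas
theorem hget_set_self (h : List Int) (i : Nat) (v : Int) (hi : i < h.length) :
    hget (h.set i v) i = v := by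
  simp [hget, List.getD, List.getElem?_set_self, hi]

theorem hget_set_ne (h : List Int) (i j : Nat) (v : Int) (hij : i ≠ j) :
    hget (h.set i v) j = hget h j := by
  simp [hget, List.getD, List.getElem?_set_ne hij]

theorem set_hget_self (h : List Int) (i : Nat) (hi : i < h.length) :
    h.set i (hget h i) = h := by
  rw [hget, List.getD_eq_getElem h 0 hi]; exact List.set_getElem_self hi

theorem perm_aux1 (t : List Int) (j : Nat) (x : Int) (hj : j < t.length) :
    (t.getD j 0 :: t.set j x).Perm (x :: t) := by
  induction t generalizing j with
  | nil => simp at hj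
  | cons b t ih =>
    cases j with
    | zero => simpa using List.Perm.swap x b t
    | succ k =>
      have hk : k < t.length := by simpa using hj
      refine (List.Perm.swap _ _ _).trans ?_
      exact ((ih k hk).cons b).trans (List.Perm.swap _ _ _)

theorem perm_aux2 (t : List Int) (i : Nat) (a x : Int) (hi : i < t.length) :
    (x :: t.set i a).Perm (a :: t.set i x) := by
  induction t generalizing i with
  | nil => simp at hi
  | cons b t ih =>
    cases i with
    | zero => simpa using List.Perm.swap a x t
    | succ k =>
      have hk : k < t.length := by simpa using hi
      refine (List.Perm.swap _ _ _).trans ?_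
      exact ((ih k hk).cons b).trans (List.Perm.swap _ _ _)

-- swapping two set positions is a permutation
theorem perm_set_swap (h : List Int) (i j : Nat) (x : Int)
    (hij : i ≠ j) (hi : i < h.length) (hj : j < h.length) :
    ((h.set i (hget h j)).set j x).Perm (h.set i x) := by
  induction h generalizing i j with
  | nil => simp at hi
  | cons a t ih =>
    cases i with
    | zero =>
      cases j with
      | zero => exact absurd rfl hij
      | succ k =>
        have hk : k < t.length := by simpa using hj
        have hg : hget (a :: t) (k + 1) = t.getD k 0 := by simp [hget, List.getD]
        rw [hg]
        simpa using perm_aux1 t k x hk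
    | succ ii =>
      have hii : ii < t.length := by simpa using hi
      cases j with
      | zero =>
        have hg : hget (a :: t) 0 = a := by simp [hget]
        rw [hg]
        simpa using perm_aux2 t ii a x hii
      | succ jj =>
        have hjj : jj < t.length := by simpa using hj
        have hg : hget (a :: t) (jj + 1) = hget t jj := by simp [hget, List.getD]
        rw [hg]
        simpa using ih ii jj (by omega) hii hjj

-- descendants in the implicit binary tree
inductive Desc : Nat → Nat → Prop
  | refl (s : Nat) : Desc s s
  | left {s j : Nat} : Desc s j → Desc s (2 * j + 1)
  | right {s j : Nat} : Desc s j → Desc s (2 * j + 2)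

theorem Desc.le_of {s j : Nat} (h : Desc s j) : s ≤ j := by
  induction h <;> omega

theorem Desc.parent {s p : Nat} (h : Desc s p) (hne : s ≠ p) : Desc s ((p - 1) / 2) := by
  cases h with
  | refl => exact absurd rfl hne
  | @left j hd => have e : (2 * j + 1 - 1) / 2 = j := by omega
                  rw [e]; exact hd
  | @right j hd => have e : (2 * j + 2 - 1) / 2 = j := by omega
                   rw [e]; exact hd

theorem desc_zero (j : Nat) : Desc 0 j := by
  induction j using Nat.strong_induction_on with
  | _ j ih =>
    match j, ih with
    | 0, _ => exact Desc.refl 0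
    | (k + 1), ih =>
      have hp : Desc 0 ((k + 1 - 1) / 2) := ih _ (by omega)
      rcases (show k + 1 = 2 * ((k + 1 - 1) / 2) + 1 ∨ k + 1 = 2 * ((k + 1 - 1) / 2) + 2 by omega)
        with h | h
      · rw [h]; exact Desc.left hp
      · rw [h]; exact Desc.right hp

def ChildOf (j i : Nat) : Prop := j = 2 * i + 1 ∨ j = 2 * i + 2

def IsHeap (h : List Int) : Prop :=
  ∀ i j, ChildOf j i → j < h.length → hget h i ≤ hget h j

theorem childof_gt {i j : Nat} (h : ChildOf j i) : i < j := by
  unfold ChildOf at h; omega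

theorem hget_eq_getElem (h : List Int) (i : Nat) (hi : i < h.length) : hget h i = h[i] :=
  List.getD_eq_getElem h 0 hi

theorem hget_append_left (h : List Int) (x : Int) (i : Nat) (hi : i < h.length) :
    hget (h ++ [x]) i = hget h i := by
  rw [hget_eq_getElem _ _ (by simp; omega), hget_eq_getElem h i hi,
    List.getElem_append_left hi]

theorem hget_append_self (h : List Int) (x : Int) :
    hget (h ++ [x]) h.length = x := by
  rw [hget_eq_getElem _ _ (by simp)]
  simp

theorem hget_dropLast (h : List Int) (i : Nat) (hi : i < h.length - 1) :
    hget h.dropLast i = hget h i := by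
  rw [hget_eq_getElem _ _ (by simp [List.length_dropLast]; omega),
    hget_eq_getElem h i (by omega), List.getElem_dropLast]

-- the bubble-up phase (_siftdown): full specification
theorem siftdown_spec (s p : Nat) :
    ∀ (h : List Int) (ni : Int),
    p < h.length → s ≤ p → Desc s p →
    (∀ i j, s ≤ i → i ≠ p → ChildOf j i → j < h.length → j ≠ p → hget h i ≤ hget h j) →
    (∀ j, ChildOf j p → j < h.length →
      ni ≤ hget h j ∧ (s < p → hget h ((p - 1) / 2) ≤ hget h j)) →
    (siftdownAux h s p ni).Perm (h.set p ni) ∧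
    (siftdownAux h s p ni).length = h.length ∧
    (∀ i j, s ≤ i → ChildOf j i → j < h.length →
      hget (siftdownAux h s p ni) i ≤ hget (siftdownAux h s p ni) j) := by
  induction p using Nat.strong_induction_on with
  | _ p ih =>
  intro h ni hp hsp hdesc hpairs hhole
  rw [siftdownAux]
  by_cases hslt : s < p
  · rw [dif_pos hslt]
    by_cases hni : ni < hget h ((p - 1) / 2)
    · rw [if_pos hni]
      set pp := (p - 1) / 2 with hppdef
      have hppp : pp < p := by omega
      have hdesc' : Desc s pp := hdesc.parent (by omega)
      have hspp : s ≤ pp := hdesc'.le_of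
      set h₁ := h.set p (hget h pp) with hh1
      have hlen1 : h₁.length = h.length := by simp [hh1]
      obtain ⟨ihperm, ihlen, ihpairs⟩ := ih pp hppp h₁ ni (by omega) hspp hdesc'
        (by
          intro i j hi hipp hc hj hjpp
          have hjn : j < h.length := by rwa [hlen1] at hj
          by_cases hjp : j = p
          · subst hjp
            have hieq : i = pp := by unfold ChildOf at hc; omega
            rw [hieq, hget_set_ne _ _ _ _ (by omega), hget_set_self _ _ _ hp]
          · by_cases hip : i = p
            · subst hip
              rw [hget_set_self _ _ _ hp, hget_set_ne _ _ _ _ (by omega)]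
              exact (hhole j hc hjn).2 hslt
            · rw [hget_set_ne _ _ _ _ (by omega), hget_set_ne _ _ _ _ (by omega)]
              exact hpairs i j hi hip hc hjn hjp)
        (by
          intro j hc hjlen
          have hjn : j < h.length := by rwa [hlen1] at hjlen
          by_cases hjp : j = p
          · subst hjp
            rw [hget_set_self _ _ _ hp]
            refine ⟨le_of_lt hni, ?_⟩
            intro hspp2
            rw [hget_set_ne _ _ _ _ (by omega)]
            have hdgp : Desc s ((pp - 1) / 2) := hdesc'.parent (by omega)
            exact hpairs ((pp - 1) / 2) pp hdgp.le_of (by omega)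
              (by unfold ChildOf; omega) (by omega) (by omega)
          · have hjne : hget h₁ j = hget h j := hget_set_ne _ _ _ _ (by omega)
            have h5 : hget h pp ≤ hget h j := hpairs pp j hspp (by omega) hc hjn hjp
            refine ⟨by rw [hjne]; omega, ?_⟩
            intro hspp2
            rw [hjne, hget_set_ne _ _ _ _ (by omega)]
            have hdgp : Desc s ((pp - 1) / 2) := hdesc'.parent (by omega)
            have h6 : hget h ((pp - 1) / 2) ≤ hget h pp := hpairs ((pp - 1) / 2) pp
              hdgp.le_of (by omega) (by unfold ChildOf; omega) (by omega) (by omega)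
            omega)
      refine ⟨?_, ?_, ?_⟩
      · exact ihperm.trans (perm_set_swap h p pp ni (by omega) hp (by omega))
      · rw [ihlen, hlen1]
      · intro i j hi hc hj
        exact ihpairs i j hi hc (by rwa [hlen1])
    · rw [if_neg hni]
      refine ⟨List.Perm.refl _, by simp, ?_⟩
      intro i j hi hc hj
      by_cases hip : i = p
      · have hjp : j ≠ p := by have := childof_gt hc; omega
        rw [hip, hget_set_self _ _ _ hp, hget_set_ne _ _ _ _ (by omega)]
        exact (hhole j (by rwa [hip] at hc) hj).1
      · by_cases hjp : j = p
        · have hieq : i = (p - 1) / 2 := by unfold ChildOf at hc; omega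
          rw [hjp, hget_set_ne _ _ _ _ (by omega), hget_set_self _ _ _ hp, hieq]
          omega
        · rw [hget_set_ne _ _ _ _ (by omega), hget_set_ne _ _ _ _ (by omega)]
          exact hpairs i j hi hip hc hj hjp
  · rw [dif_neg hslt]
    refine ⟨List.Perm.refl _, by simp, ?_⟩
    intro i j hi hc hj
    by_cases hip : i = p
    · have hjp : j ≠ p := by have := childof_gt hc; omega
      rw [hip, hget_set_self _ _ _ hp, hget_set_ne _ _ _ _ (by omega)]
      exact (hhole j (by rwa [hip] at hc) hj).1
    · by_cases hjp : j = p
      · exfalso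
        subst hjp
        unfold ChildOf at hc
        omega
      · rw [hget_set_ne _ _ _ _ (by omega), hget_set_ne _ _ _ _ (by omega)]
        exact hpairs i j hi hip hc hj hjp

-- the sink phase (_siftup loop) + final bubble-up
theorem siftupAux_spec (s : Nat) (m : Nat) :
    ∀ (h : List Int) (p : Nat) (ni : Int),
    h.length - p ≤ m → p < h.length → s ≤ p → Desc s p →
    (∀ i j, s ≤ i → i ≠ p → ChildOf j i → j < h.length → j ≠ p → hget h i ≤ hget h j) →
    (s < p → ∀ j, ChildOf j p → j < h.length → hget h ((p - 1) / 2) ≤ hget h j) →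
    (siftupAux h h.length s p ni).Perm (h.set p ni) ∧
    (siftupAux h h.length s p ni).length = h.length ∧
    (∀ i j, s ≤ i → ChildOf j i → j < h.length →
      hget (siftupAux h h.length s p ni) i ≤ hget (siftupAux h h.length s p ni) j) := by
  induction m with
  | zero => intro h p ni hm hp _ _ _ _; omega
  | succ m ih =>
  intro h p ni hm hp hsp hdesc hpairs hhole2
  rw [siftupAux]
  by_cases hc2 : 2 * p + 1 < h.length
  · rw [dif_pos hc2]
    set c := if 2 * p + 2 < h.length ∧ ¬ hget h (2 * p + 1) < hget h (2 * p + 2)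
      then 2 * p + 2 else 2 * p + 1 with hcdef
    have hcchild : ChildOf c p := by unfold ChildOf; rw [hcdef]; split <;> omega
    have hcp : p < c := by rw [hcdef]; split <;> omega
    have hcn : c < h.length := by rw [hcdef]; split <;> omega
    have hminchild : ∀ j, ChildOf j p → j < h.length → hget h c ≤ hget h j := by
      intro j hcj hj
      rw [hcdef]
      unfold ChildOf at hcj
      split <;> rcases hcj with rfl | rfl <;> omega
    set h₁ := h.set p (hget h c) with hh1
    have hlen1 : h₁.length = h.length := by simp [hh1]
    have hdesc' : Desc s c := by
      unfold ChildOf at hcchild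
      rcases hcchild with heq | heq
      · rw [heq]; exact hdesc.left
      · rw [heq]; exact hdesc.right
    obtain ⟨ihperm, ihlen, ihpairs⟩ := ih h₁ c ni (by rw [hlen1]; omega)
      (by rw [hlen1]; exact hcn) (by omega) hdesc'
      (by
        intro i j hi hic hcj hj hjc
        have hjn : j < h.length := by rwa [hlen1] at hj
        by_cases hjp : j = p
        · have hieq : i = (p - 1) / 2 := by unfold ChildOf at hcj; omega
          have hsltp : s < p := by
            have : i < p := by unfold ChildOf at hcj; omega
            omega
          rw [hjp, hget_set_ne _ _ _ _ (by omega), hget_set_self _ _ _ hp, hieq]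
          exact hhole2 hsltp c hcchild hcn
        · by_cases hip : i = p
          · rw [hip, hget_set_self _ _ _ hp, hget_set_ne _ _ _ _ (by omega)]
            exact hminchild j (by rwa [hip] at hcj) hjn
          · rw [hget_set_ne _ _ _ _ (by omega), hget_set_ne _ _ _ _ (by omega)]
            exact hpairs i j hi hip hcj hjn hjp)
      (by
        intro _ j hcj hj
        have hjn : j < h.length := by rwa [hlen1] at hj
        have hcp2 : (c - 1) / 2 = p := by unfold ChildOf at hcchild; omega
        have hjgt : c < j := childof_gt hcj
        rw [hcp2, hget_set_self _ _ _ hp, hget_set_ne _ _ _ _ (by omega)]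
        exact hpairs c j (by omega) (by omega) hcj hjn (by omega))
    rw [hlen1] at ihperm ihlen ihpairs
    refine ⟨?_, ihlen, fun i j hi hcj hj => ihpairs i j hi hcj hj⟩
    refine ihperm.trans ?_
    rw [hh1]
    exact perm_set_swap h p c ni (by omega) hp hcn
  · rw [dif_neg hc2]
    have hlen2 : (h.set p ni).length = h.length := by simp
    obtain ⟨sdperm, sdlen, sdpairs⟩ := siftdown_spec s p (h.set p ni) ni (by omega) hsp hdesc
      (by
        intro i j hi hip hcj hj hjp
        have hjn : j < h.length := by rwa [hlen2] at hj
        rw [hget_set_ne _ _ _ _ (by omega), hget_set_ne _ _ _ _ (by omega)]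
        exact hpairs i j hi hip hcj hjn hjp)
      (by
        intro j hcj hj
        exfalso
        unfold ChildOf at hcj
        rw [hlen2] at hj
        omega)
    rw [List.set_set] at sdperm
    rw [hlen2] at sdlen
    exact ⟨sdperm, sdlen, fun i j hi hcj hj => sdpairs i j hi hcj (by rwa [hlen2])⟩

theorem siftup_spec (h : List Int) (p : Nat) (hp : p < h.length)
    (hpre : ∀ i j, p < i → ChildOf j i → j < h.length → hget h i ≤ hget h j) :
    (siftup h p).Perm h ∧ (siftup h p).length = h.length ∧
    (∀ i j, p ≤ i → ChildOf j i → j < h.length → hget (siftup h p) i ≤ hget (siftup h p) j) := by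
  obtain ⟨hperm, hlen, hpairs⟩ := siftupAux_spec p h.length h p (hget h p) (by omega) hp
    (le_refl p) (Desc.refl p)
    (fun i j hi hip hcj hj hjp => hpre i j (by omega) hcj hj)
    (fun hlt => absurd hlt (by omega))
  unfold siftup
  rw [set_hget_self h p hp] at hperm
  exact ⟨hperm, hlen, hpairs⟩

theorem heapify_aux (k : Nat) (h : List Int) (hk2 : 2 * k ≤ h.length)
    (hk : ∀ i j, k ≤ i → ChildOf j i → j < h.length → hget h i ≤ hget h j) :
    (((List.range k).reverse).foldl (fun acc i => siftup acc i) h).Perm h ∧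
    (((List.range k).reverse).foldl (fun acc i => siftup acc i) h).length = h.length ∧
    IsHeap (((List.range k).reverse).foldl (fun acc i => siftup acc i) h) := by
  induction k generalizing h with
  | zero =>
    refine ⟨List.Perm.refl _, rfl, ?_⟩
    intro i j hc hj
    exact hk i j (Nat.zero_le _) hc hj
  | succ k ih =>
    have hrange : (List.range (k + 1)).reverse = k :: (List.range k).reverse := by
      rw [List.range_succ]; simp
    rw [hrange, List.foldl_cons]
    have hkn : k < h.length := by omega
    obtain ⟨hperm1, hlen1, hpairs1⟩ := siftup_spec h k hkn
      (fun i j hi hc hj => hk i j (by omega) hc hj)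
    obtain ⟨hperm2, hlen2, hheap2⟩ := ih (siftup h k) (by omega)
      (fun i j hi hc hj => hpairs1 i j hi hc (by rwa [hlen1] at hj))
    exact ⟨hperm2.trans hperm1, by rw [hlen2, hlen1], hheap2⟩

theorem heapify_spec (l : List Int) :
    (heapify l).Perm l ∧ (heapify l).length = l.length ∧ IsHeap (heapify l) := by
  unfold heapify
  refine heapify_aux (l.length / 2) l (by omega) ?_
  intro i j hi hc hj
  exfalso
  unfold ChildOf at hc
  omega

theorem root_min (h : List Int) (hh : IsHeap h) :
    ∀ j, j < h.length → hget h 0 ≤ hget h j := by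
  intro j
  induction j using Nat.strong_induction_on with
  | _ j ih =>
    intro hj
    match j, ih with
    | 0, _ => exact le_refl _
    | (k + 1), ih =>
      have h1 : hget h 0 ≤ hget h ((k + 1 - 1) / 2) := ih _ (by omega) (by omega)
      have h2 : hget h ((k + 1 - 1) / 2) ≤ hget h (k + 1) := by
        refine hh _ _ ?_ hj
        unfold ChildOf; omega
      exact h1.trans h2

theorem heappop_spec (h : List Int) (hh : IsHeap h) (hne : h ≠ []) :
    (heappop h).1 = hget h 0 ∧ ((heappop h).1 :: (heappop h).2).Perm h ∧
    IsHeap (heappop h).2 ∧ (heappop h).2.length + 1 = h.length := by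
  have hn : 0 < h.length := List.length_pos_iff.mpr hne
  by_cases h1 : h.length = 1
  · obtain ⟨a, ha⟩ := List.length_eq_one_iff.mp h1
    subst ha
    have hp : heappop [a] = (a, []) := by unfold heappop; simp [hget]
    rw [hp]
    refine ⟨by simp [hget], by simp, ?_, by simp⟩
    intro i j hc hj
    simp at hj
  · have hn2 : 2 ≤ h.length := by omega
    have hrlen : h.dropLast.length = h.length - 1 := by simp
    have hrne : h.dropLast ≠ [] := by
      rw [← List.length_pos_iff, hrlen]; omega
    have hiszero : h.dropLast.isEmpty = false := by
      cases hd : h.dropLast.isEmpty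
      · rfl
      · exact absurd (List.isEmpty_iff.mp hd) hrne
    have hpop : heappop h = (hget h.dropLast 0,
        siftup ((h.dropLast).set 0 (hget h (h.length - 1))) 0) := by
      unfold heappop
      simp [hiszero]
    set lastelt := hget h (h.length - 1) with hle
    set x := (h.dropLast).set 0 lastelt with hx
    have hxlen : x.length = h.length - 1 := by simp [hx, hrlen]
    obtain ⟨hperm1, hlen1, hpairs1⟩ := siftup_spec x 0 (by omega)
      (by
        intro i j hi hc hj
        have hij := childof_gt hc
        rw [hxlen] at hj
        have hgi : hget x i = hget h i := by
          rw [hx, hget_set_ne _ _ _ _ (by omega), hget_dropLast _ _ (by omega)]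
        have hgj : hget x j = hget h j := by
          rw [hx, hget_set_ne _ _ _ _ (by omega), hget_dropLast _ _ (by omega)]
        rw [hgi, hgj]
        exact hh i j hc (by omega))
    have hm : hget h.dropLast 0 = hget h 0 := hget_dropLast _ _ (by omega)
    rw [hpop]
    refine ⟨hm, ?_, ?_, ?_⟩
    · -- (hget h 0 :: siftup x 0).Perm h
      simp only [hm]
      obtain ⟨t, ht⟩ : ∃ t, h.dropLast = hget h 0 :: t := by
        obtain ⟨b, t, hbt⟩ := List.exists_cons_of_ne_nil hrne
        refine ⟨t, ?_⟩
        have hb : hget h.dropLast 0 = b := by rw [hbt]; simp [hget]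
        rw [hbt, ← hb, hm]
      have hxval : x = lastelt :: t := by rw [hx, ht]; rfl
      have hlast : h = h.dropLast ++ [lastelt] := by
        rw [hle, hget_eq_getElem h _ (by omega)]
        conv_lhs => rw [← List.dropLast_append_getLast hne]
        congr 1
        simp [List.getLast_eq_getElem]
      have h4 : h = hget h 0 :: (t ++ [lastelt]) := by
        rw [hlast, ht]; rfl
      have c1 : (hget h 0 :: siftup x 0).Perm (hget h 0 :: lastelt :: t) := by
        rw [← hxval]; exact hperm1.cons _
      have c2 : (hget h 0 :: lastelt :: t).Perm (hget h 0 :: (t ++ [lastelt])) :=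
        ((List.perm_append_singleton lastelt t).symm.cons _)
      exact (c1.trans c2).trans (List.Perm.of_eq h4.symm)
    · intro i j hc hj
      exact hpairs1 i j (Nat.zero_le _) hc (by rw [hlen1] at hj; exact hj)
    · rw [hlen1, hxlen]; omega

theorem heappush_spec (h : List Int) (x : Int) (hh : IsHeap h) :
    (heappush h x).Perm (x :: h) ∧ IsHeap (heappush h x) ∧
    (heappush h x).length = h.length + 1 := by
  have hlen1 : (h ++ [x]).length = h.length + 1 := by simp
  have hpn : h.length < (h ++ [x]).length := by simp
  have hsd := siftdown_spec 0 h.length (h ++ [x]) x hpn (Nat.zero_le _) (desc_zero _)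
    (by
      intro i j _ hip hc hj hjp
      have hij := childof_gt hc
      have hjn : j < h.length := by rw [hlen1] at hj; omega
      have hin : i < h.length := by omega
      rw [hget_append_left _ _ _ hin, hget_append_left _ _ _ hjn]
      exact hh i j hc hjn)
    (by
      intro j hc hj
      exfalso
      unfold ChildOf at hc
      rw [hlen1] at hj
      omega)
  obtain ⟨hperm, hlen, hpairs⟩ := hsd
  have hset : (h ++ [x]).set h.length x = h ++ [x] := by
    have := set_hget_self (h ++ [x]) h.length hpn
    rwa [hget_append_self] at this
  have heq : heappush h x = siftdownAux (h ++ [x]) 0 h.length x := by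
    unfold heappush
    simp
  rw [heq]
  refine ⟨?_, ?_, ?_⟩
  · rw [hset] at hperm
    exact hperm.trans (List.perm_append_singleton x h)
  · intro i j hc hj
    exact hpairs i j (Nat.zero_le _) hc (by rw [hlen] at hj; rwa [hlen1] at hj ⊢)
  · rw [hlen, hlen1]

-- B-side lemmas
theorem insertMix_eq (rest : List Int) (m : Int) :
    insertMix rest m =
      rest.takeWhile (fun y => y ≤ m) ++ m :: rest.dropWhile (fun y => y ≤ m) := by
  unfold insertMix
  rw [PySem.List.insert_natCast _ _ _ (List.Sublist.length_le (List.takeWhile_sublist _))]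
  set tw := rest.takeWhile (fun y => y ≤ m) with htw
  set dw := rest.dropWhile (fun y => y ≤ m) with hdw
  have hsplit : rest = tw ++ dw := (List.takeWhile_append_dropWhile).symm
  rw [hsplit, List.take_left, List.drop_left]

theorem dropWhile_ge (rest : List Int) (m : Int) (hs : rest.Pairwise (· ≤ ·)) :
    ∀ b ∈ rest.dropWhile (fun y => y ≤ m), m ≤ b := by
  induction rest with
  | nil => simp
  | cons r rs ih =>
    intro b hb
    by_cases hr : r ≤ m
    · rw [List.dropWhile_cons_of_pos (by simpa using hr)] at hb
      exact ih (List.Pairwise.of_cons hs) b hb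
    · rw [List.dropWhile_cons_of_neg (by simpa using hr)] at hb
      rcases List.mem_cons.mp hb with rfl | hb2
      · omega
      · have := (List.pairwise_cons.mp hs).1 b hb2
        omega

theorem insertMix_perm (rest : List Int) (m : Int) : (insertMix rest m).Perm (m :: rest) := by
  rw [insertMix_eq]
  refine List.perm_middle.trans ?_
  rw [List.takeWhile_append_dropWhile]

theorem insertMix_sorted (rest : List Int) (m : Int) (hs : rest.Pairwise (· ≤ ·)) :
    (insertMix rest m).Pairwise (· ≤ ·) := by
  rw [insertMix_eq, List.pairwise_append]
  refine ⟨hs.sublist (List.takeWhile_sublist _), ?_, ?_⟩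
  · rw [List.pairwise_cons]
    exact ⟨dropWhile_ge rest m hs, hs.sublist (List.dropWhile_sublist _)⟩
  · intro a ha b hb
    have ham : a ≤ m := by simpa using List.mem_takeWhile_imp ha
    rcases List.mem_cons.mp hb with rfl | hb2
    · exact ham
    · have := dropWhile_ge rest m hs b hb2
      omega

-- heads agree: the heap root equals the head of any sorted permutation
theorem head_eq_root (h : List Int) (a : Int) (s' : List Int) (hh : IsHeap h)
    (hperm : (a :: s').Perm h) (hsort : (a :: s').Pairwise (· ≤ ·)) : hget h 0 = a := by
  have hlen : 0 < h.length := by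
    have := hperm.length_eq
    simp at this
    omega
  have hmem : a ∈ h := hperm.subset (List.mem_cons_self)
  obtain ⟨k, hk, hak⟩ := List.getElem_of_mem hmem
  have h1 : hget h 0 ≤ a := by
    rw [← hak, ← hget_eq_getElem h k hk]
    exact root_min h hh k hk
  have hmem0 : hget h 0 ∈ h := by
    rw [hget_eq_getElem h 0 hlen]
    exact List.getElem_mem hlen
  have h2 : a ≤ hget h 0 := by
    rcases List.mem_cons.mp (hperm.symm.subset hmem0) with he | hs2
    · omega
    · exact (List.pairwise_cons.mp hsort).1 _ hs2
  omega

-- the two loops agree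
theorem loop_eq (fuel : Nat) (h s : List Int) (K cnt : Int)
    (hlen : h.length ≤ fuel) (hne : h ≠ [])
    (hheap : IsHeap h) (hsort : s.Pairwise (· ≤ ·)) (hperm : s.Perm h) :
    solLoop fuel h K cnt = altLoop s K cnt := by
  induction fuel generalizing h s cnt with
  | zero =>
    exfalso
    have := List.length_pos_iff.mpr hne
    omega
  | succ fuel ih =>
  have hslen : s.length = h.length := hperm.length_eq
  have hn : 0 < h.length := List.length_pos_iff.mpr hne
  obtain ⟨a, s', rfl⟩ : ∃ a s', s = a :: s' := by
    cases s with
    | nil => simp at hslen; omega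
    | cons a s' => exact ⟨a, s', rfl⟩
  have hroot : hget h 0 = a := head_eq_root h a s' hheap hperm hsort
  simp only [solLoop]
  rw [hroot]
  by_cases hK : a < K
  · rw [if_pos hK]
    by_cases h1 : h.length = 1
    · rw [if_pos h1]
      have hs0 : s' = [] := List.length_eq_zero_iff.mp (by simp at hslen; omega)
      subst hs0
      rw [altLoop]
      simp [hK]
    · rw [if_neg h1]
      have hn2 : 2 ≤ h.length := by omega
      obtain ⟨b, s'', rfl⟩ : ∃ b s'', s' = b :: s'' := by
        cases s' with
        | nil => simp at hslen; omega
        | cons b s'' => exact ⟨b, s'', rfl⟩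
      obtain ⟨hm1, hperm1, hheap1, hlen1⟩ := heappop_spec h hheap hne
      have e1 : (heappop h).1 = a := by rw [hm1, hroot]
      have hperm1' : (heappop h).2.Perm (b :: s'') :=
        List.Perm.cons_inv (e1 ▸ (hperm1.trans hperm.symm))
      have hne1 : (heappop h).2 ≠ [] := by
        rw [← List.length_pos_iff]; omega
      obtain ⟨hm2, hperm2, hheap2, hlen2⟩ := heappop_spec (heappop h).2 hheap1 hne1
      have hsort' : (b :: s'').Pairwise (· ≤ ·) := hsort.of_cons
      have hroot2 : hget (heappop h).2 0 = b :=
        head_eq_root _ b s'' hheap1 hperm1'.symm hsort'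
      have e2 : (heappop (heappop h).2).1 = b := by rw [hm2, hroot2]
      have hperm2' : (heappop (heappop h).2).2.Perm s'' :=
        List.Perm.cons_inv (e2 ▸ (hperm2.trans hperm1'))
      obtain ⟨hpperm, hpheap, hplen⟩ :=
        heappush_spec (heappop (heappop h).2).2 (a + b * 2) hheap2
      rw [e1, e2, altLoop, if_pos hK]
      refine ih _ (insertMix s'' (a + b * 2)) (cnt + 1) (by omega) ?_ hpheap
        (insertMix_sorted _ _ hsort'.of_cons) ?_
      · rw [← List.length_pos_iff]; omega
      · exact ((insertMix_perm s'' (a + b * 2)).trans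
          ((hperm2'.symm).cons (a + b * 2))).trans hpperm.symm
  · rw [if_neg hK]
    cases s' with
    | nil => rw [altLoop]; simp [hK]
    | cons b s'' => rw [altLoop]; simp [hK]

-- ===== VERDICT (by name: the statement is the Claim_ definition above) =====
theorem solution_spec : Claim_equal_solution := by
  intro scoville K _ hpre
  unfold Spec_solution solution solution_alt
  obtain ⟨hperm, hlen, hheap⟩ := heapify_spec scoville
  refine loop_eq _ _ _ K 0 (by omega) ?_ hheap ?_ ?_
  · intro hnil; apply hpre; rw [← List.length_eq_zero_iff]; rw [← hlen, hnil]; rfl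
  · simpa using PySem.List.sorted_pairwise scoville (fun x => x)
  · exact (PySem.List.sorted_perm scoville (fun x => x) false).trans hperm.symm
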